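-- pv_equiv track=rewrite | github.com/craftihor/Ml-lab-excerises | listthen.py | learn
-- ===== SOURCE A (Python) =====
-- def learn(concepts,target,vspace):
--     i = 0
--     while i < len(concepts):
--         h = concepts[i]
--         if target[i] == "yes":
--             k = 0
--             while k < len(vspace):
--                 x = vspace[k]
--                 for j in range(2) :
--                     if (x[j] != h[j]) and (x[j] != "?") :
--                         vspace.remove(x)
--                         k = k - 1
--                         break
--                 k = k + 1
--         i = i + 1
--     return vspace
-- ===== SOURCE B (Python) =====
-- def learn(concepts, target, vspace):
--     positives = [concepts[i] for i in range(len(concepts)) if target[i] == "yes"]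
--     survivors = [x for x in vspace
--                  if all(x[j] == "?" or x[j] == h[j] for h in positives for j in range(2))]
--     vspace[:] = survivors
--     return vspace
-- ===== Notes on version B (the rewrite author's own statement) =====
-- stated objective: simpler
-- what changed: A repeatedly rescans and mutates vspace with list.remove and hand-managed indices once per positive example; B precomputes the positive concepts and keeps each hypothesis in one filtering pass, writing the survivors back with slice assignment.
-- outside the precondition, e.g. on learn([['b', 'b']], ['yes'], [['a', '?'], ['a', 'a'], ['a']]): A returns [], B returns []; on learn([['a'], ['?', 'a']], ['yes', 'yes'], [['b', '?']]): A returns [], B returns []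
import Mathlib
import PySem

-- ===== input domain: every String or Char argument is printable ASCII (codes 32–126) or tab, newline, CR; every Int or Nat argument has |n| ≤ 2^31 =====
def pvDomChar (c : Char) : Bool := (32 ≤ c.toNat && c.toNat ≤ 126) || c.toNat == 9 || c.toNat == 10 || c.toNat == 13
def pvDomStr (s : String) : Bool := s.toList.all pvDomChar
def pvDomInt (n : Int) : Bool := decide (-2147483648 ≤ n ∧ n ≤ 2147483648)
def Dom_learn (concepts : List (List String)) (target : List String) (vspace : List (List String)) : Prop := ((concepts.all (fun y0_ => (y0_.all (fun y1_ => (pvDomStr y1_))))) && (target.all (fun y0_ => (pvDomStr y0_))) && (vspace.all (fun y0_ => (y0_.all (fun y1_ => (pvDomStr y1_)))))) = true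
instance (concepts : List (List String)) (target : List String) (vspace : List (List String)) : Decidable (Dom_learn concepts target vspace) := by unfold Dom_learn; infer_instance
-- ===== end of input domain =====

-- B replaces A's repeated in-place scans with removals by a single filtering pass against the
-- precomputed positive concepts (objective: simpler).  A mutates vspace in place; B reproduces
-- that mutation via slice assignment, and the equivalence proved here is about the return value.

-- ===== PORT A =====
-- inner while loop over k: x = vspace[k]; the 'for j in range(2)' body is unrolled
-- (j = 0, then j = 1); a failed test removes the first occurrence of x and leaves k
-- unchanged (k-1 then +1), otherwise k+1.  x[j]/h[j] via pyGetD (exact inside Pre_).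
def learnBad (x h : List String) (j : Nat) : Bool :=
  decide (PySem.List.pyGetD x (j : Int) "" ≠ PySem.List.pyGetD h (j : Int) "") &&
  decide (PySem.List.pyGetD x (j : Int) "" ≠ "?")

def learnInner (h : List String) (vs : List (List String)) (k : Nat) : List (List String) :=
  if hk : k < vs.length then
    let x := vs[k]
    if learnBad x h 0 || learnBad x h 1 then
      learnInner h ((PySem.List.remove? vs x).getD vs) k
    else
      learnInner h vs (k + 1)
  else vs
termination_by vs.length - k
decreasing_by
  · have hx : vs[k] ∈ vs := List.getElem_mem hk
    have h2 : (PySem.List.remove? vs vs[k]).getD vs = vs.erase vs[k] := by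
      rw [PySem.List.remove?_eq_some_erase vs vs[k] hx]; rfl
    have h3 := List.length_erase_of_mem hx
    simp only [h2, h3]
    omega
  · omega

def learnOuter (concepts : List (List String)) (target : List String)
    (vs : List (List String)) (i : Nat) : List (List String) :=
  if hi : i < concepts.length then
    let h := concepts[i]
    if PySem.List.pyGetD target (i : Int) "" = "yes" then
      learnOuter concepts target (learnInner h vs 0) (i + 1)
    else
      learnOuter concepts target vs (i + 1)
  else vs
termination_by concepts.length - i

def learn (concepts : List (List String)) (target : List String) (vspace : List (List String)) : List (List String) :=
  learnOuter concepts target vspace 0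

-- ===== PORT B =====
-- positives = [concepts[i] for i in range(len(concepts)) if target[i] == "yes"];
-- one filtering pass keeps x iff for every positive h and j in {0,1}, x[j] == "?" or x[j] == h[j].
def learnConsistent (x h : List String) : Bool :=
  (decide (PySem.List.pyGetD x (0 : Int) "" = "?") ||
   decide (PySem.List.pyGetD x (0 : Int) "" = PySem.List.pyGetD h (0 : Int) "")) &&
  (decide (PySem.List.pyGetD x (1 : Int) "" = "?") ||
   decide (PySem.List.pyGetD x (1 : Int) "" = PySem.List.pyGetD h (1 : Int) ""))

def learn_alt (concepts : List (List String)) (target : List String) (vspace : List (List String)) : List (List String) :=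
  let positives := ((List.range concepts.length).filter
      (fun (i : Nat) => decide (PySem.List.pyGetD target (i : Int) "" = "yes"))).map
      (fun (i : Nat) => PySem.List.pyGetD concepts (i : Int) [])
  vspace.filter (fun x => positives.all (fun h => learnConsistent x h))

-- ===== PRECONDITION & SPEC =====
-- Pre_ excludes exactly the IndexError region of A: target shorter than concepts, and, when some
-- positive example exists and vspace is nonempty, any row of vspace or any positive concept row
-- shorter than 2.  It is slightly conservative: A can still return when such a short row happens
-- to be removed at j = 0 or vspace empties before a short positive row is reached (see cites);
-- on those excluded inputs B returns the same value.
def Pre_learn (concepts : List (List String)) (target : List String) (vspace : List (List String)) : Prop :=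
  concepts.length ≤ target.length ∧
  ((∃ i, i < concepts.length ∧ target.getD i "" = "yes") → vspace ≠ [] →
    ((∀ x ∈ vspace, 2 ≤ x.length) ∧
     (∀ i, i < concepts.length → target.getD i "" = "yes" → 2 ≤ (concepts.getD i []).length)))
instance (concepts : List (List String)) (target : List String) (vspace : List (List String)) : Decidable (Pre_learn concepts target vspace) := by
  unfold Pre_learn; infer_instance

def pvWitness_learn : List (List String) × List String × List (List String) :=
  ([["a", "b"], ["a", "c"]], ["yes", "no"], [["a", "b"], ["?", "b"], ["c", "b"]])

def Spec_learn (concepts : List (List String)) (target : List String) (vspace : List (List String)) (out : List (List String)) : Prop := out = learn_alt concepts target vspace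
instance (concepts : List (List String)) (target : List String) (vspace : List (List String)) (out : List (List String)) : Decidable (Spec_learn concepts target vspace out) := by unfold Spec_learn; infer_instance

-- ===== CLAIM (what is proved, stated in full; the proofs are below) =====
def Claim_equal_learn : Prop := ∀ (concepts : List (List String)) (target : List String) (vspace : List (List String)), Dom_learn concepts target vspace → Pre_learn concepts target vspace → Spec_learn concepts target vspace (learn concepts target vspace)

-- ===== LEMMAS AND PROOFS =====

-- the keep-predicate of one pass of A's inner loop
def learnKeep (h x : List String) : Bool := !(learnBad x h 0 || learnBad x h 1)

theorem pvErase_of_split {α : Type} [BEq α] [LawfulBEq α] (a : α) (l l1 l2 : List α)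
    (hl : l = l1 ++ a :: l2) (h : a ∉ l1) : l.erase a = l1 ++ l2 := by
  subst hl
  rw [List.erase_append_right _ h, List.erase_cons_head]

theorem learnInner_eq_aux (h : List String) :
    ∀ (n : Nat) (vs : List (List String)) (k : Nat), vs.length - k ≤ n →
    (∀ y ∈ vs.take k, learnKeep h y = true) →
    learnInner h vs k = vs.take k ++ (vs.drop k).filter (learnKeep h) := by
  intro n
  induction n with
  | zero =>
    intro vs k hn _
    have hk : ¬ k < vs.length := by omega
    have ht : vs.take k = vs := List.take_of_length_le (by omega)
    have hd : vs.drop k = [] := List.drop_eq_nil_of_le (by omega)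
    rw [learnInner]
    simp [hk, ht, hd]
  | succ n ih =>
    intro vs k hn hpre
    rw [learnInner]
    by_cases hk : k < vs.length
    · simp only [hk, dif_pos]
      have hx : vs[k] ∈ vs := List.getElem_mem hk
      have hdropk : vs.drop k = vs[k] :: vs.drop (k + 1) := List.drop_eq_getElem_cons hk
      have htklen : (vs.take k).length = k := by simp [List.length_take]; omega
      by_cases hb : (learnBad vs[k] h 0 || learnBad vs[k] h 1) = true
      · simp only [hb, if_pos]
        have hkeepx : learnKeep h vs[k] = false := by simp [learnKeep, hb]
        have hnotpre : vs[k] ∉ vs.take k := by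
          intro hmem
          have := hpre _ hmem
          rw [hkeepx] at this
          exact Bool.false_ne_true this
        have hsplit : vs = vs.take k ++ vs[k] :: vs.drop (k + 1) :=
          (List.take_append_drop k vs).symm.trans (by rw [hdropk])
        have herase : vs.erase vs[k] = vs.take k ++ vs.drop (k + 1) :=
          pvErase_of_split vs[k] vs (vs.take k) (vs.drop (k + 1)) hsplit hnotpre
        have hrm : (PySem.List.remove? vs vs[k]).getD vs = vs.take k ++ vs.drop (k + 1) := by
          rw [PySem.List.remove?_eq_some_erase vs vs[k] hx, Option.getD_some, herase]
        rw [hrm]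
        have hlen2 : (vs.take k ++ vs.drop (k + 1)).length - k ≤ n := by
          have h5 : (vs.take k ++ vs.drop (k + 1)).length = k + (vs.length - (k + 1)) := by
            simp [htklen]
          omega
        have hpre2 : ∀ y ∈ (vs.take k ++ vs.drop (k + 1)).take k, learnKeep h y = true := by
          rw [List.take_left' htklen]
          exact hpre
        rw [ih _ _ hlen2 hpre2, List.take_left' htklen, List.drop_left' htklen,
            hdropk, List.filter_cons_of_neg (by simp [hkeepx])]
      · simp only [hb, if_neg, Bool.not_eq_true]
        have hkeepx : learnKeep h vs[k] = true := by
          simp only [learnKeep, hb]; rfl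
        have htake1 : vs.take (k + 1) = vs.take k ++ [vs[k]] := by
          rw [List.take_add_one, List.getElem?_eq_getElem hk]; rfl
        have hpre2 : ∀ y ∈ vs.take (k + 1), learnKeep h y = true := by
          rw [htake1]
          intro y hy
          rcases List.mem_append.mp hy with h1 | h2
          · exact hpre _ h1
          · rw [List.mem_singleton.mp h2]; exact hkeepx
        rw [ih _ _ (by omega) hpre2, htake1, hdropk,
            List.filter_cons_of_pos hkeepx, List.append_assoc, List.singleton_append]
    · have ht : vs.take k = vs := List.take_of_length_le (by omega)
      have hd : vs.drop k = [] := List.drop_eq_nil_of_le (by omega)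
      simp [hk, ht, hd]

theorem learnInner_eq (h : List String) (vs : List (List String)) :
    learnInner h vs 0 = vs.filter (learnKeep h) := by
  have := learnInner_eq_aux h vs.length vs 0 (by omega) (by simp)
  simpa using this

theorem learnOuter_eq (concepts : List (List String)) (target : List String) :
    ∀ (n : Nat) (vs : List (List String)) (i : Nat), concepts.length - i ≤ n →
    learnOuter concepts target vs i =
      vs.filter (fun x => (List.range' i (concepts.length - i)).all
        (fun j => !(decide (PySem.List.pyGetD target (j : Int) "" = "yes")) ||
                  learnKeep (concepts.getD j []) x)) := by
  intro n
  induction n with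
  | zero =>
    intro vs i hn
    have hi : ¬ i < concepts.length := by omega
    have h0 : concepts.length - i = 0 := by omega
    rw [learnOuter]
    simp [hi, h0, List.filter_true]
  | succ n ih =>
    intro vs i hn
    rw [learnOuter]
    by_cases hi : i < concepts.length
    · simp only [hi, dif_pos]
      have hsub : concepts.length - i = (concepts.length - (i + 1)) + 1 := by omega
      have hrange : List.range' i (concepts.length - i) =
          i :: List.range' (i + 1) (concepts.length - (i + 1)) := by
        rw [hsub, List.range'_succ]
      have hgetD : concepts.getD i [] = concepts[i] := List.getD_eq_getElem concepts [] hi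
      by_cases hy : PySem.List.pyGetD target (i : Int) "" = "yes"
      · have hy' : target[i]?.getD "" = "yes" := by simpa using hy
        simp only [hy, if_pos]
        rw [ih _ _ (by omega), learnInner_eq, List.filter_filter]
        apply List.filter_congr
        intro x _
        rw [hrange, List.all_cons]
        simp [hy', List.getElem?_eq_getElem hi, Bool.and_comm]
      · have hy' : ¬ target[i]?.getD "" = "yes" := by simpa using hy
        simp only [hy, if_neg, not_false_iff]
        rw [ih _ _ (by omega)]
        apply List.filter_congr
        intro x _
        rw [hrange, List.all_cons]
        simp [hy']
    · have h0 : concepts.length - i = 0 := by omega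
      simp [hi, h0, List.filter_true]

theorem learnConsistent_eq_keep (h x : List String) :
    learnConsistent x h = learnKeep h x := by
  simp only [learnConsistent, learnKeep, learnBad]
  by_cases h0 : PySem.List.pyGetD x (0 : Int) "" = "?" <;>
  by_cases h1 : PySem.List.pyGetD x (1 : Int) "" = "?" <;>
  by_cases e0 : PySem.List.pyGetD x (0 : Int) "" = PySem.List.pyGetD h (0 : Int) "" <;>
  by_cases e1 : PySem.List.pyGetD x (1 : Int) "" = PySem.List.pyGetD h (1 : Int) "" <;>
  simp [h0, h1, e0, e1]

theorem all_filter_or {α : Type} (l : List α) (p q : α → Bool) :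
    (l.filter p).all q = l.all (fun a => !p a || q a) := by
  induction l with
  | nil => rfl
  | cons a l ih => by_cases hp : p a <;> simp [hp, ih]

-- ===== VERDICT (by name: the statement is the Claim_ definition above) =====
theorem learn_spec : Claim_equal_learn := by
  intro concepts target vspace _ _
  unfold Spec_learn learn learn_alt
  rw [learnOuter_eq concepts target (concepts.length - 0) vspace 0 (by omega)]
  simp only [Nat.sub_zero, ← List.range_eq_range']
  apply Eq.symm
  apply List.filter_congr
  intro x _
  rw [List.all_map, all_filter_or]
  apply List.all_congr rfl
  intro j
  simp [Function.comp, learnConsistent_eq_keep]
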